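-- pv_equiv track=rewrite | github.com/Hallyson34/uPython2 | matriz_permutacao.py | verificaColuna
-- ===== SOURCE A (Python) =====
-- def verificaColuna(A,n,j):
--     cont0 = 0
--     cont1 = 0
--     for i in range(n):
--         if A[i][j] == 0:
--             cont0+=1
--         elif A[i][j] == 1:
--             cont1+=1
--         else:
--             return False
--     if cont0 == n-1 and cont1 == 1:
--         return True
--     else:
--         return False
-- ===== SOURCE B (Python) =====
-- def verificaColuna(A, n, j):
--     # phase 1: skip leading zeros until the (hoped-for single) 1
--     i = 0
--     while i < n and A[i][j] == 0:
--         i += 1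
--     if i >= n or A[i][j] != 1:
--         return False
--     # phase 2: every entry after that 1 must be 0
--     i += 1
--     while i < n and A[i][j] == 0:
--         i += 1
--     return i == n
-- ===== Notes on version B (the rewrite author's own statement) =====
-- stated objective: alternative
-- what changed: Replaces the two-counter counting loop with a positional find-and-verify scan: advance past leading zeros to the first nonzero entry, require it to be 1, then verify the remaining suffix is all zeros (no counters, early exit on a second nonzero).
import Mathlib
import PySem

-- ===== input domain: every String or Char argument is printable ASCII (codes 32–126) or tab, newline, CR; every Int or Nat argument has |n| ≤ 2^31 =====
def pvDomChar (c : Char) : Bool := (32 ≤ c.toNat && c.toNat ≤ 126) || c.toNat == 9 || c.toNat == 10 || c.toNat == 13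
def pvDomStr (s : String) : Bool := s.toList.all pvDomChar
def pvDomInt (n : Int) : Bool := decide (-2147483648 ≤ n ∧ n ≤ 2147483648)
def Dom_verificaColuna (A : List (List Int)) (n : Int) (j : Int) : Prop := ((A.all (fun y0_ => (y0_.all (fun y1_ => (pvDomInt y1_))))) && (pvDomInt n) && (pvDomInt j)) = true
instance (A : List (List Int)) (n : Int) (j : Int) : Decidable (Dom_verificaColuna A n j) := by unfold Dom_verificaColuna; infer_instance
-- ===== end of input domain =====

-- B replaces A's two-counter counting loop by a positional find-and-verify scan: skip leading zeros, require the first nonzero to be 1, then verify the suffix is all zeros (alternative decomposition, same cost).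


-- A[i][j] as Python computes it: none = IndexError
def lookupAt (A : List (List Int)) (j i : Int) : Option Int :=
  (PySem.List.pyGet? A i).bind (fun r => PySem.List.pyGet? r j)

-- ===== PORT A =====
-- A's for-loop over the remaining indices, carrying cont0/cont1; a 'none' lookup = IndexError (outside Pre_; the port returns false there)
def goA (A : List (List Int)) (j n : Int) : List Int → Int → Int → Bool
  | [], c0, c1 => decide (c0 = n - 1 ∧ c1 = 1)
  | i :: rest, c0, c1 =>
    match lookupAt A j i with
    | some x =>
      if x = 0 then goA A j n rest (c0 + 1) c1
      else if x = 1 then goA A j n rest c0 (c1 + 1)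
      else false
    | none => false

def verificaColuna (A : List (List Int)) (n : Int) (j : Int) : Bool :=
  goA A j n (PySem.List.pyRange 0 n 1) 0 0

-- ===== PORT B =====
-- B's 'while i < n and A[i][j] == 0: i += 1': returns the stopping index, none = IndexError (outside Pre_; the port returns false there)
def skipZeros (A : List (List Int)) (j n : Int) (i : Int) : Option Int :=
  if _h : i < n then
    match lookupAt A j i with
    | some x => if x = 0 then skipZeros A j n (i + 1) else some i
    | none => none
  else some i
  termination_by (n - i).toNat
  decreasing_by omega

def verificaColuna_alt (A : List (List Int)) (n : Int) (j : Int) : Bool :=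
  match skipZeros A j n 0 with
  | none => false
  | some i =>
    if i ≥ n then false
    else
      match lookupAt A j i with
      | none => false
      | some x =>
        if x ≠ 1 then false
        else
          match skipZeros A j n (i + 1) with
          | none => false
          | some i2 => decide (i2 = n)

-- ===== PRECONDITION & SPEC =====
-- an entry A[k][j] that exists but is neither 0 nor 1 (A returns False as soon as it meets one)
def badAt (A : List (List Int)) (j k : Int) : Bool :=
  match lookupAt A j k with
  | some x => x != 0 && x != 1
  | none => false

-- Pre_ excludes exactly the inputs on which Python A raises IndexError: an index i in range(n) whose
-- lookup A[i][j] is out of range and that A's loop actually reaches (no earlier non-0/1 entry).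
-- the quantifier is truncated at len(A)+1: every lookup A[i][j] with i ≥ len(A) is out of range anyway,
-- so this is equivalent to the same condition over all of range(n) and stays evaluable for huge n
def Pre_verificaColuna (A : List (List Int)) (n : Int) (j : Int) : Prop :=
  ∀ i ∈ PySem.List.pyRange 0 (min n ((A.length : Int) + 1)) 1,
    (lookupAt A j i).isSome ∨ ∃ k ∈ PySem.List.pyRange 0 i 1, badAt A j k = true
instance (A : List (List Int)) (n : Int) (j : Int) : Decidable (Pre_verificaColuna A n j) := by
  unfold Pre_verificaColuna; infer_instance
def pvWitness_verificaColuna : List (List Int) × Int × Int := ([[0, 1], [1, 0]], 2, 1)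

def Spec_verificaColuna (A : List (List Int)) (n : Int) (j : Int) (out : Bool) : Prop := out = verificaColuna_alt A n j
instance (A : List (List Int)) (n : Int) (j : Int) (out : Bool) : Decidable (Spec_verificaColuna A n j out) := by unfold Spec_verificaColuna; infer_instance

-- ===== CLAIM =====
def Claim_equal_verificaColuna : Prop := ∀ (A : List (List Int)) (n : Int) (j : Int), Dom_verificaColuna A n j → Pre_verificaColuna A n j → Spec_verificaColuna A n j (verificaColuna A n j)

-- ===== LEMMAS AND PROOFS =====

-- the four one-step unfoldings of the while-loop scan
theorem skipZeros_step0 (A : List (List Int)) (j n i : Int) (hlt : i < n)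
    (hx : lookupAt A j i = some 0) : skipZeros A j n i = skipZeros A j n (i + 1) := by
  rw [skipZeros.eq_def, dif_pos hlt, hx]; simp

theorem skipZeros_stop (A : List (List Int)) (j n i : Int) (hlt : i < n) (x : Int)
    (hx : lookupAt A j i = some x) (h0 : ¬ x = 0) : skipZeros A j n i = some i := by
  rw [skipZeros.eq_def, dif_pos hlt, hx]; simp [h0]

theorem skipZeros_none (A : List (List Int)) (j n i : Int) (hlt : i < n)
    (hx : lookupAt A j i = none) : skipZeros A j n i = none := by
  rw [skipZeros.eq_def, dif_pos hlt, hx]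

theorem skipZeros_done (A : List (List Int)) (j n i : Int) (hge : ¬ i < n) :
    skipZeros A j n i = some i := by
  rw [skipZeros.eq_def, dif_neg hge]

-- if the skipping scan hits an out-of-range lookup, A's loop from the same point returns false too
theorem goA_of_skip_none (A : List (List Int)) (j n : Int) :
    ∀ (i : Int), skipZeros A j n i = none →
      ∀ c0 c1, goA A j n (PySem.List.pyRange i n 1) c0 c1 = false := by
  intro i
  induction i using skipZeros.induct A j n with
  | case1 i hlt hx ih =>
    intro hnone c0 c1
    rw [skipZeros_step0 A j n i hlt hx] at hnone
    rw [PySem.List.pyRange_one_cons hlt]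
    simp only [goA, hx]
    exact ih hnone _ _
  | case2 i hlt x hx h0 =>
    intro hnone
    rw [skipZeros_stop A j n i hlt x hx h0] at hnone
    exact absurd hnone (by simp)
  | case3 i hlt hx =>
    intro _ c0 c1
    rw [PySem.List.pyRange_one_cons hlt]
    simp [goA, hx]
  | case4 i hge =>
    intro hnone
    rw [skipZeros_done A j n i hge] at hnone
    exact absurd hnone (by simp)

-- the skipping scan only moves forward, and never beyond n when started at ≤ n
theorem skip_ge (A : List (List Int)) (j n : Int) :
    ∀ (i i' : Int), skipZeros A j n i = some i' → i ≤ i' ∧ (i ≤ n → i' ≤ n) := by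
  intro i
  induction i using skipZeros.induct A j n with
  | case1 i hlt hx ih =>
    intro i' hsome
    rw [skipZeros_step0 A j n i hlt hx] at hsome
    have := ih i' hsome
    exact ⟨by omega, fun _ => this.2 (by omega)⟩
  | case2 i hlt x hx h0 =>
    intro i' hsome
    rw [skipZeros_stop A j n i hlt x hx h0] at hsome
    have : i = i' := by simpa using hsome
    omega
  | case3 i hlt hx =>
    intro i' hsome
    rw [skipZeros_none A j n i hlt hx] at hsome
    exact absurd hsome (by simp)
  | case4 i hge =>
    intro i' hsome
    rw [skipZeros_done A j n i hge] at hsome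
    have : i = i' := by simpa using hsome
    omega

-- if the skipping scan stops strictly before n, it stopped at an existing nonzero entry
theorem skip_stop (A : List (List Int)) (j n : Int) :
    ∀ (i i' : Int), skipZeros A j n i = some i' → i' < n →
      ∃ x, lookupAt A j i' = some x ∧ x ≠ 0 := by
  intro i
  induction i using skipZeros.induct A j n with
  | case1 i hlt hx ih =>
    intro i' hsome hlt'
    rw [skipZeros_step0 A j n i hlt hx] at hsome
    exact ih i' hsome hlt'
  | case2 i hlt x hx h0 =>
    intro i' hsome _
    rw [skipZeros_stop A j n i hlt x hx h0] at hsome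
    have : i = i' := by simpa using hsome
    subst this
    exact ⟨x, hx, h0⟩
  | case3 i hlt hx =>
    intro i' hsome
    rw [skipZeros_none A j n i hlt hx] at hsome
    exact absurd hsome (by simp)
  | case4 i hge =>
    intro i' hsome hlt'
    rw [skipZeros_done A j n i hge] at hsome
    have : i = i' := by simpa using hsome
    omega

-- A's loop over the zeros skipped by the scan just transfers their count into cont0
theorem goA_skip (A : List (List Int)) (j n : Int) :
    ∀ (i i' : Int), skipZeros A j n i = some i' →
      ∀ c0 c1, goA A j n (PySem.List.pyRange i n 1) c0 c1 =
        goA A j n (PySem.List.pyRange i' n 1) (c0 + (i' - i)) c1 := by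
  intro i
  induction i using skipZeros.induct A j n with
  | case1 i hlt hx ih =>
    intro i' hsome c0 c1
    rw [skipZeros_step0 A j n i hlt hx] at hsome
    rw [PySem.List.pyRange_one_cons hlt]
    have h1 : goA A j n (i :: PySem.List.pyRange (i + 1) n 1) c0 c1
        = goA A j n (PySem.List.pyRange (i + 1) n 1) (c0 + 1) c1 := by
      simp [goA, hx]
    rw [h1, ih i' hsome (c0 + 1) c1]
    have h2 : c0 + 1 + (i' - (i + 1)) = c0 + (i' - i) := by ring
    rw [h2]
  | case2 i hlt x hx h0 =>
    intro i' hsome c0 c1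
    rw [skipZeros_stop A j n i hlt x hx h0] at hsome
    have : i = i' := by simpa using hsome
    subst this
    congr 1
    ring
  | case3 i hlt hx =>
    intro i' hsome
    rw [skipZeros_none A j n i hlt hx] at hsome
    exact absurd hsome (by simp)
  | case4 i hge =>
    intro i' hsome c0 c1
    rw [skipZeros_done A j n i hge] at hsome
    have : i = i' := by simpa using hsome
    subst this
    congr 1
    ring

-- once cont1 ≥ 2 A's loop can only return false
theorem goA_two_ones (A : List (List Int)) (j n : Int) :
    ∀ (l : List Int) (c0 c1 : Int), 2 ≤ c1 → goA A j n l c0 c1 = false := by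
  intro l
  induction l with
  | nil =>
    intro c0 c1 h
    simp only [goA, decide_eq_false_iff_not]
    omega
  | cons k l ih =>
    intro c0 c1 h
    simp only [goA]
    cases lookupAt A j k with
    | none => rfl
    | some x =>
      by_cases h0 : x = 0
      · simp only [if_pos h0]; exact ih _ _ h
      · by_cases h1 : x = 1
        · simp only [if_neg h0, if_pos h1]; exact ih _ _ (by omega)
        · simp [h0, h1]

-- ===== VERDICT =====
theorem verificaColuna_spec : Claim_equal_verificaColuna := by
  intro A n j _ _
  unfold Spec_verificaColuna verificaColuna verificaColuna_alt
  cases hp1 : skipZeros A j n 0 with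
  | none => exact goA_of_skip_none A j n 0 hp1 0 0
  | some i =>
    dsimp only
    have hi0 : 0 ≤ i := (skip_ge A j n 0 i hp1).1
    rw [goA_skip A j n 0 i hp1 0 0]
    by_cases hin : i ≥ n
    · -- scan ran off the end (or n ≤ 0): all entries zero, cont1 stays 0
      rw [if_pos hin, PySem.List.pyRange_one_eq_nil (by omega)]
      simp only [goA, decide_eq_false_iff_not]
      omega
    · rw [if_neg hin]
      push_neg at hin
      obtain ⟨x, hx, hx0⟩ := skip_stop A j n 0 i hp1 hin
      rw [hx]
      dsimp only
      rw [PySem.List.pyRange_one_cons hin]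
      simp only [goA, hx, if_neg hx0]
      by_cases hx1 : x = 1
      · -- found the 1; now the suffix scan
        simp only [hx1, ne_eq, not_true_eq_false, if_false]
        cases hp2 : skipZeros A j n (i + 1) with
        | none => exact goA_of_skip_none A j n (i + 1) hp2 _ _
        | some i2 =>
          dsimp only
          have hi2 := skip_ge A j n (i + 1) i2 hp2
          have hi2n : i2 ≤ n := hi2.2 (by omega)
          rw [goA_skip A j n (i + 1) i2 hp2 _ _]
          by_cases h2n : i2 = n
          · subst h2n
            rw [PySem.List.pyRange_one_eq_nil le_rfl]
            simp only [goA]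
            simp only [if_true, decide_true, decide_eq_true_eq]
            omega
          · -- a second nonzero entry before n: both sides false
            have hlt2 : i2 < n := by omega
            obtain ⟨y, hy, hy0⟩ := skip_stop A j n (i + 1) i2 hp2 hlt2
            rw [PySem.List.pyRange_one_cons hlt2]
            simp only [goA, hy, if_neg hy0]
            by_cases hy1 : y = 1
            · rw [if_pos hy1, goA_two_ones A j n _ _ _ (by omega)]
              simp [h2n]
            · simp [hy1, h2n]
      · simp [hx1]
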